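-- pv_equiv track=rewrite | github.com/Nimantha97/webwidget-ai-assistant | app/graph/builder.py | _determine_node_type
-- ===== SOURCE A (Python) =====
-- from typing import List, Dict, Any
--
-- def _determine_node_type(annotations: List[str]) -> str:
--     """Determine class type from annotations"""
--     if any(a in annotations for a in ['@RestController', '@Controller']):
--         return 'Controller'
--     elif '@Service' in annotations:
--         return 'Service'
--     elif '@Repository' in annotations:
--         return 'Repository'
--     elif '@Entity' in annotations:
--         return 'Entity'
--     else:
--         return 'Class'
-- ===== SOURCE B (Python) =====
-- _RANK = {'@RestController': 0, '@Controller': 0,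
--          '@Service': 1, '@Repository': 2, '@Entity': 3}
-- _LABEL = ['Controller', 'Service', 'Repository', 'Entity', 'Class']
--
-- def _determine_node_type(annotations):
--     """Determine class type from annotations"""
--     best = 4
--     for a in annotations:
--         r = _RANK.get(a, 4)
--         if r < best:
--             best = r
--     return _LABEL[best]
-- ===== Notes on version B (the rewrite author's own statement) =====
-- stated objective: alternative
-- what changed: Replaces the if-elif cascade of membership scans over the list with a single pass over the annotations that tracks the minimum priority rank from a lookup table, then indexes a label array.
import Mathlib
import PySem

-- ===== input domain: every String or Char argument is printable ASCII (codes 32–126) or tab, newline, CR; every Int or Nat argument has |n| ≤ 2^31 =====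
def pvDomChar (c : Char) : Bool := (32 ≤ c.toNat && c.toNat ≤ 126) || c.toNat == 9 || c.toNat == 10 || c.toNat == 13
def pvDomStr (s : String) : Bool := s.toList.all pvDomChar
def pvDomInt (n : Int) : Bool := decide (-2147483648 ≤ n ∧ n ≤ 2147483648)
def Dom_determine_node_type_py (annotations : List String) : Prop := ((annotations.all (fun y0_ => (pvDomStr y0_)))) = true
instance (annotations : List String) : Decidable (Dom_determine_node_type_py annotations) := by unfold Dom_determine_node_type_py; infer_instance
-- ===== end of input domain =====

-- B replaces A's if-elif cascade of list membership scans with a single pass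
-- tracking the minimum priority rank from a lookup table (alternative decomposition).


-- ===== PORT A =====
def determine_node_type_py (annotations : List String) : String :=
  if annotations.contains "@RestController" || annotations.contains "@Controller" then
    "Controller"
  else if annotations.contains "@Service" then "Service"
  else if annotations.contains "@Repository" then "Repository"
  else if annotations.contains "@Entity" then "Entity"
  else "Class"

-- ===== PORT B =====
-- _RANK.get(a, 4): first-match lookup in the literal dict (exact: keys are distinct literals)
def pvRank (a : String) : Nat :=
  if a = "@RestController" then 0 else if a = "@Controller" then 0
  else if a = "@Service" then 1 else if a = "@Repository" then 2
  else if a = "@Entity" then 3 else 4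

def pvLabel : List String := ["Controller", "Service", "Repository", "Entity", "Class"]

def determine_node_type_py_alt (annotations : List String) : String :=
  let best := annotations.foldl (fun best a =>
    let r := pvRank a
    if r < best then r else best) 4
  pvLabel.getD best ""

-- ===== PRECONDITION & SPEC =====
def Spec_determine_node_type_py (annotations : List String) (out : String) : Prop := out = determine_node_type_py_alt annotations
instance (annotations : List String) (out : String) : Decidable (Spec_determine_node_type_py annotations out) := by unfold Spec_determine_node_type_py; infer_instance

-- ===== CLAIM (what is proved, stated in full; the proofs are below) =====
def Claim_equal_determine_node_type_py : Prop := ∀ (annotations : List String), Dom_determine_node_type_py annotations → Spec_determine_node_type_py annotations (determine_node_type_py annotations)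

-- ===== LEMMAS AND PROOFS =====

-- the fold step is just Nat.min with the rank
theorem pv_step_min (b : Nat) (a : String) :
    (let r := pvRank a; if r < b then r else b) = min b (pvRank a) := by
  simp only [min_def]; split_ifs <;> omega

-- minimum rank over the list, as a foldr
def pvMinRank (l : List String) : Nat := l.foldr (fun a m => min (pvRank a) m) 4

theorem pv_fold_eq_min (l : List String) (b : Nat) (hb : b ≤ 4) :
    l.foldl (fun best a => let r := pvRank a; if r < best then r else best) b
      = min b (pvMinRank l) := by
  simp only [pv_step_min]
  induction l generalizing b with
  | nil => simp [pvMinRank, min_eq_left hb]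
  | cons a t ih =>
    rw [List.foldl_cons, ih _ (le_trans (min_le_left _ _) hb)]
    simp only [pvMinRank, List.foldr_cons, min_assoc]

theorem pvMinRank_le_iff (l : List String) (k : Nat) :
    pvMinRank l ≤ k ↔ 4 ≤ k ∨ ∃ a ∈ l, pvRank a ≤ k := by
  induction l with
  | nil => simp [pvMinRank]
  | cons a t ih =>
    simp only [pvMinRank, List.foldr_cons] at *
    constructor
    · intro h
      rcases min_le_iff.mp h with h | h
      · exact Or.inr ⟨a, by simp, h⟩
      · rcases ih.mp h with h | ⟨x, hx, hr⟩
        · exact Or.inl h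
        · exact Or.inr ⟨x, by simp [hx], hr⟩
    · intro h
      apply min_le_iff.mpr
      rcases h with h | ⟨x, hx, hr⟩
      · exact Or.inr (ih.mpr (Or.inl h))
      · rcases List.mem_cons.mp hx with rfl | hx
        · exact Or.inl hr
        · exact Or.inr (ih.mpr (Or.inr ⟨x, hx, hr⟩))

theorem pvMinRank_le_four (l : List String) : pvMinRank l ≤ 4 :=
  (pvMinRank_le_iff l 4).mpr (Or.inl le_rfl)

theorem pvRank_le_zero (a : String) :
    pvRank a ≤ 0 ↔ a = "@RestController" ∨ a = "@Controller" := by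
  unfold pvRank
  split_ifs <;> simp_all

theorem pvRank_le_one (a : String) :
    pvRank a ≤ 1 ↔ a = "@RestController" ∨ a = "@Controller" ∨ a = "@Service" := by
  unfold pvRank
  split_ifs <;> simp_all

theorem pvRank_le_two (a : String) :
    pvRank a ≤ 2 ↔ a = "@RestController" ∨ a = "@Controller" ∨ a = "@Service" ∨ a = "@Repository" := by
  unfold pvRank
  split_ifs <;> simp_all

theorem pvRank_le_three (a : String) :
    pvRank a ≤ 3 ↔ a = "@RestController" ∨ a = "@Controller" ∨ a = "@Service" ∨ a = "@Repository" ∨ a = "@Entity" := by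
  unfold pvRank
  split_ifs <;> simp_all

theorem alt_eq_label (l : List String) :
    determine_node_type_py_alt l = pvLabel.getD (pvMinRank l) "" := by
  unfold determine_node_type_py_alt
  rw [pv_fold_eq_min _ _ le_rfl, min_eq_right (pvMinRank_le_four l)]

-- ===== VERDICT (by name: the statement is the Claim_ definition above) =====
theorem determine_node_type_py_spec : Claim_equal_determine_node_type_py := by
  intro l _
  unfold Spec_determine_node_type_py
  rw [alt_eq_label]
  simp only [determine_node_type_py, Bool.or_eq_true, List.contains_eq_mem,
    decide_eq_true_eq]
  have hle := pvMinRank_le_four l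
  by_cases h0 : "@RestController" ∈ l ∨ "@Controller" ∈ l
  · have : pvMinRank l ≤ 0 := (pvMinRank_le_iff l 0).mpr (Or.inr (by
      rcases h0 with h | h
      · exact ⟨_, h, (pvRank_le_zero _).mpr (Or.inl rfl)⟩
      · exact ⟨_, h, (pvRank_le_zero _).mpr (Or.inr rfl)⟩))
    simp [h0, show pvMinRank l = 0 by omega, pvLabel]
  · have hn0 : ¬ pvMinRank l ≤ 0 := by
      intro h
      rcases (pvMinRank_le_iff l 0).mp h with h | ⟨x, hx, hr⟩
      · omega
      · rcases (pvRank_le_zero x).mp hr with rfl | rfl <;> exact h0 (by simp [hx])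
    by_cases h1 : "@Service" ∈ l
    · have : pvMinRank l ≤ 1 := (pvMinRank_le_iff l 1).mpr
        (Or.inr ⟨_, h1, (pvRank_le_one _).mpr (by simp)⟩)
      simp [h0, h1, show pvMinRank l = 1 by omega, pvLabel]
    · have hn1 : ¬ pvMinRank l ≤ 1 := by
        intro h
        rcases (pvMinRank_le_iff l 1).mp h with h | ⟨x, hx, hr⟩
        · omega
        · rcases (pvRank_le_one x).mp hr with rfl | rfl | rfl
          · exact h0 (by simp [hx])
          · exact h0 (by simp [hx])
          · exact h1 hx
      by_cases h2 : "@Repository" ∈ l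
      · have : pvMinRank l ≤ 2 := (pvMinRank_le_iff l 2).mpr
          (Or.inr ⟨_, h2, (pvRank_le_two _).mpr (by simp)⟩)
        simp [h0, h1, h2, show pvMinRank l = 2 by omega, pvLabel]
      · have hn2 : ¬ pvMinRank l ≤ 2 := by
          intro h
          rcases (pvMinRank_le_iff l 2).mp h with h | ⟨x, hx, hr⟩
          · omega
          · rcases (pvRank_le_two x).mp hr with rfl | rfl | rfl | rfl
            · exact h0 (by simp [hx])
            · exact h0 (by simp [hx])
            · exact h1 hx
            · exact h2 hx
        by_cases h3 : "@Entity" ∈ l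
        · have : pvMinRank l ≤ 3 := (pvMinRank_le_iff l 3).mpr
            (Or.inr ⟨_, h3, (pvRank_le_three _).mpr (by simp)⟩)
          simp [h0, h1, h2, h3, show pvMinRank l = 3 by omega, pvLabel]
        · have hn3 : ¬ pvMinRank l ≤ 3 := by
            intro h
            rcases (pvMinRank_le_iff l 3).mp h with h | ⟨x, hx, hr⟩
            · omega
            · rcases (pvRank_le_three x).mp hr with rfl | rfl | rfl | rfl | rfl
              · exact h0 (by simp [hx])
              · exact h0 (by simp [hx])
              · exact h1 hx
              · exact h2 hx
              · exact h3 hx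
          simp [h0, h1, h2, h3, show pvMinRank l = 4 by omega, pvLabel]
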